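-- pv_equiv track=rewrite | github.com/a163912/RelationExtraction | main.py | make_triple_include_other
-- ===== SOURCE A (Python) =====
-- def make_triple_include_other(entity_pool_len, default_triple: list):
--     '''
--     아무 관계를 갖지 않는 개체도 트리플로 표현하기 위한 함수
--     :param entity_pool_len: 문장의 전체 개체 수
--     :param default_triple: 실제로 관계를 갖고 있는 개체들이 포함된 트리플
--     :return:
--     '''
--     triple_include_other = set()
--
--     for sub_id in range(entity_pool_len):
--         sub_id = sub_id + 2
--         flag = False
--
--         for triple in default_triple:
--             if triple[0] == sub_id:
--                 flag = True
--                 triple_include_other.add(triple)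
--
--         if not flag:
--             triple_include_other.add((sub_id, 1, 1))
--
--     return list(triple_include_other)
-- ===== SOURCE B (Python) =====
-- def make_triple_include_other(entity_pool_len, default_triple: list):
--     # Group the triples by subject id in one pass, then one index-driven pass
--     # over the subject ids 2 .. entity_pool_len+1.
--     index = {}
--     for triple in default_triple:
--         index.setdefault(triple[0], []).append(triple)
--
--     result = set()
--     for sub_id in range(2, entity_pool_len + 2):
--         if sub_id in index:
--             result.update(index[sub_id])
--         else:
--             result.add((sub_id, 1, 1))
--     return list(result)
-- ===== Notes on version B (the rewrite author's own statement) =====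
-- stated objective: faster
-- what changed: Replaces the per-sub_id rescan of default_triple with a single grouping pass building a subject-id index dict, followed by one index-driven pass over the sub_id range.
import Mathlib
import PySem

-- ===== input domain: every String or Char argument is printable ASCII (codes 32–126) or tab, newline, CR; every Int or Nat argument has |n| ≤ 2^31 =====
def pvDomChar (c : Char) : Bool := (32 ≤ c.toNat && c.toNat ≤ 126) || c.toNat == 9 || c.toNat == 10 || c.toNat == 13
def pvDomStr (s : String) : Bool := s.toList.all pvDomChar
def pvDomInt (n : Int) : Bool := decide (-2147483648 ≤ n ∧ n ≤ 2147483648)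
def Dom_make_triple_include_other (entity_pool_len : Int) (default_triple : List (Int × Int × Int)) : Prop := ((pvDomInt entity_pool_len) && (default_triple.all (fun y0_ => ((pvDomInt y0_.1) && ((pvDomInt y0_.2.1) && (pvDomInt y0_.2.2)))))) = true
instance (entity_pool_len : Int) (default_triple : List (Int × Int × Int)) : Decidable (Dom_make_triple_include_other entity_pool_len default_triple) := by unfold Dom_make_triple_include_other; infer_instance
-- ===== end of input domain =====

-- B replaces A's per-sub_id rescan of default_triple with one grouping pass (a dict index by
-- subject id) plus one index-driven pass over the sub_id range (faster: O(n+m) vs O(n*m)).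
-- Both return list(set(...)): results are compared as sets; the ports list the set in insertion order.

-- ===== PORT A =====
def make_triple_include_other (entity_pool_len : Int) (default_triple : List (Int × Int × Int)) : List (Int × Int × Int) :=
  -- triple_include_other = set(); for sub_id in range(entity_pool_len): ...
  (PySem.List.pyRange 0 entity_pool_len 1).foldl (fun acc sub_id0 =>
    let sub_id := sub_id0 + 2
    -- flag = False; for triple in default_triple: if triple[0] == sub_id: flag = True; add
    let st := default_triple.foldl
      (fun (p : Bool × PySem.Set (Int × Int × Int)) triple =>
        if triple.1 == sub_id then (true, PySem.Set.add p.2 triple) else p)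
      (false, acc)
    if !st.1 then PySem.Set.add st.2 (sub_id, 1, 1) else st.2)
    PySem.Set.empty

-- ===== PORT B =====
def make_triple_include_other_alt (entity_pool_len : Int) (default_triple : List (Int × Int × Int)) : List (Int × Int × Int) :=
  -- index = {}; for triple in default_triple: index.setdefault(triple[0], []).append(triple)
  let index : PySem.Dict Int (List (Int × Int × Int)) :=
    default_triple.foldl
      (fun d triple => PySem.Dict.modify d triple.1 [] (fun l => l ++ [triple]))
      PySem.Dict.empty
  -- result = set(); for sub_id in range(2, entity_pool_len + 2): ...
  (PySem.List.pyRange 2 (entity_pool_len + 2) 1).foldl (fun res sub_id =>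
    if PySem.Dict.contains index sub_id then
      PySem.Set.update res (PySem.Dict.getD index sub_id [])  -- index[sub_id]; key present under the guard
    else
      PySem.Set.add res (sub_id, 1, 1))
    PySem.Set.empty

-- ===== PRECONDITION & SPEC =====
def Spec_make_triple_include_other (entity_pool_len : Int) (default_triple : List (Int × Int × Int)) (out : List (Int × Int × Int)) : Prop := out = make_triple_include_other_alt entity_pool_len default_triple
instance (entity_pool_len : Int) (default_triple : List (Int × Int × Int)) (out : List (Int × Int × Int)) : Decidable (Spec_make_triple_include_other entity_pool_len default_triple out) := by unfold Spec_make_triple_include_other; infer_instance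

-- ===== CLAIM (what is proved, stated in full; the proofs are below) =====
def Claim_equal_make_triple_include_other : Prop := ∀ (entity_pool_len : Int) (default_triple : List (Int × Int × Int)), Dom_make_triple_include_other entity_pool_len default_triple → Spec_make_triple_include_other entity_pool_len default_triple (make_triple_include_other entity_pool_len default_triple)

-- ===== LEMMAS AND PROOFS =====

-- A's inner loop: flag = (old flag or some triple matches); set = old set updated with the matches in order.
theorem pvInner (default_triple : List (Int × Int × Int)) (sub : Int) :
    ∀ (f0 : Bool) (s : PySem.Set (Int × Int × Int)),
    default_triple.foldl
      (fun (p : Bool × PySem.Set (Int × Int × Int)) triple =>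
        if triple.1 == sub then (true, PySem.Set.add p.2 triple) else p)
      (f0, s)
    = (f0 || default_triple.any (fun t => t.1 == sub),
       PySem.Set.update s (default_triple.filter (fun t => t.1 == sub))) := by
  induction default_triple with
  | nil => intro f0 s; simp [PySem.Set.update]
  | cons t rest ih =>
    intro f0 s
    by_cases h : t.1 = sub
    · have hb : (t.1 == sub) = true := by simp [h]
      rw [List.foldl_cons, if_pos hb, ih]
      simp [PySem.Set.update, hb]
    · have hb : ¬((t.1 == sub) = true) := by simp [h]
      rw [List.foldl_cons, if_neg hb, ih]
      simp [hb]

-- B's index: the stored list for key k is exactly the sub-list of triples with subject k.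
theorem pvIndexGetD (default_triple : List (Int × Int × Int)) (k : Int) :
    PySem.Dict.getD
      (default_triple.foldl
        (fun d triple => PySem.Dict.modify d triple.1 [] (fun l => l ++ [triple]))
        PySem.Dict.empty) k []
    = default_triple.filter (fun t => t.1 == k) := by
  have h : default_triple.foldl
      (fun d triple => PySem.Dict.modify d triple.1 [] (fun l => l ++ [triple]))
      PySem.Dict.empty
    = (default_triple.map (fun t => (t.1, t))).foldl
        (fun d p => PySem.Dict.modify d p.1 [] (fun l => l ++ [p.2]))
        PySem.Dict.empty := by
    rw [List.foldl_map]
  rw [h, PySem.Dict.getD_foldl_modify_append]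
  simp [List.filter_map, Function.comp_def]

-- B's index contains k iff some triple has subject k.
theorem pvIndexContains (default_triple : List (Int × Int × Int)) (k : Int) :
    PySem.Dict.contains
      (default_triple.foldl
        (fun d triple => PySem.Dict.modify d triple.1 [] (fun l => l ++ [triple]))
        PySem.Dict.empty) k
    = default_triple.any (fun t => t.1 == k) := by
  rw [PySem.Dict.contains_eq_decide_mem_keys]
  have h : default_triple.foldl
      (fun d triple => PySem.Dict.modify d triple.1 [] (fun l => l ++ [triple]))
      PySem.Dict.empty
    = (default_triple.map (fun t => (t.1, t))).foldl
        (fun d p => PySem.Dict.modify d p.1 [] (fun l => l ++ [p.2]))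
        PySem.Dict.empty := by
    rw [List.foldl_map]
  rw [h, PySem.Dict.keys_foldl_modify_key]
  simp only [List.map_map, Function.comp_def, PySem.Dict.keys, PySem.Dict.empty, List.map_nil]
  rw [PySem.Set.update_nil_left]
  have hiff : k ∈ PySem.Set.ofList (List.map (fun t : Int × Int × Int => t.1) default_triple)
      ↔ (default_triple.any fun t => t.1 == k) = true := by
    rw [PySem.Set.mem_ofList, List.any_eq_true]
    constructor
    · intro hm
      rcases List.mem_map.mp hm with ⟨t, ht, hk⟩
      exact ⟨t, ht, by simp [hk]⟩
    · rintro ⟨t, ht, hk⟩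
      exact List.mem_map.mpr ⟨t, ht, by simpa using hk⟩
  simp only [hiff]
  exact Bool.decide_eq_true

theorem pvStepEq (default_triple : List (Int × Int × Int)) (acc : PySem.Set (Int × Int × Int)) (sub : Int) :
    (let st := default_triple.foldl
        (fun (p : Bool × PySem.Set (Int × Int × Int)) triple =>
          if triple.1 == sub then (true, PySem.Set.add p.2 triple) else p)
        (false, acc)
     if !st.1 then PySem.Set.add st.2 (sub, 1, 1) else st.2)
    = (if PySem.Dict.contains
          (default_triple.foldl
            (fun d triple => PySem.Dict.modify d triple.1 [] (fun l => l ++ [triple]))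
            PySem.Dict.empty) sub then
        PySem.Set.update acc
          (PySem.Dict.getD
            (default_triple.foldl
              (fun d triple => PySem.Dict.modify d triple.1 [] (fun l => l ++ [triple]))
              PySem.Dict.empty) sub [])
      else PySem.Set.add acc (sub, 1, 1)) := by
  rw [pvInner, pvIndexGetD, pvIndexContains]
  by_cases h : default_triple.any (fun t => t.1 == sub) = true
  · simp [h]
  · have hfil : default_triple.filter (fun t => t.1 == sub) = [] := by
      simp only [List.any_eq_true, not_exists, not_and] at h
      simp only [List.filter_eq_nil_iff]
      intro t ht
      simp [h t ht]
    simp [h, hfil, PySem.Set.update]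

-- ===== VERDICT (by name: the statement is the Claim_ definition above) =====
theorem make_triple_include_other_spec : Claim_equal_make_triple_include_other := by
  intro n dt _
  unfold Spec_make_triple_include_other make_triple_include_other make_triple_include_other_alt
  rw [PySem.List.pyRange_one 0 n, PySem.List.pyRange_one 2 (n + 2)]
  have harg : n + 2 - 2 = n - 0 := by ring
  rw [harg, List.foldl_map, List.foldl_map]
  apply PySem.List.foldl_congr_mem
  intro acc k _
  have h2 : (0 : Int) + (k : Int) + 2 = 2 + (k : Int) := by ring
  simp only [h2]
  exact pvStepEq dt acc (2 + (k : Int))
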